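-- pv_equiv track=rewrite | github.com/SturmEnte/advent-of-code | 2022/day 9/main.py | touches_knot
-- ===== SOURCE A (Python) =====
-- def touches_knot(knot, m_knot):
--     x = -1
--     y = -1
--     for _ in range(9):
--         if knot[0] + x == m_knot[0] and knot[1] + y == m_knot[1]:
--             return True
--         x += 1
--         if x == 2:
--             x = -1
--             y += 1
--     return False
-- ===== SOURCE B (Python) =====
-- def touches_knot(knot, m_knot):
--     return abs(knot[0] - m_knot[0]) <= 1 and abs(knot[1] - m_knot[1]) <= 1
-- ===== Notes on version B (the rewrite author's own statement) =====
-- stated objective: simpler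
-- what changed: Replaced the 9-iteration offset-enumeration loop with a closed-form Chebyshev-distance test: both coordinate differences within 1.
import Mathlib
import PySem

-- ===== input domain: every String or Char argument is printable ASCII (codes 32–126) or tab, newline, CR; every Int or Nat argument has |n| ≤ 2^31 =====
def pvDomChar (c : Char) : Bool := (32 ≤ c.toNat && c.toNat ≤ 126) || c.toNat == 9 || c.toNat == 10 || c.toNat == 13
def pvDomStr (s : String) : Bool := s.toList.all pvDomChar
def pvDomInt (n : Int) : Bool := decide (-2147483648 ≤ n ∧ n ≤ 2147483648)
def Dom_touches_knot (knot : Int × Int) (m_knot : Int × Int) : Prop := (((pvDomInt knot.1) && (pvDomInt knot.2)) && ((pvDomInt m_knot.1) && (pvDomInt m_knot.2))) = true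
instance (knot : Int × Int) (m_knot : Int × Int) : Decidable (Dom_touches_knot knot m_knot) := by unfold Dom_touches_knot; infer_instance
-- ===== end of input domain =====

-- B replaces A's 9-iteration offset-enumeration loop by a closed-form Chebyshev-distance test (simpler).

-- ===== PORT A =====
-- loop over `range(9)` carrying the mutable state (x, y), with early return True
def touchesKnotLoop (knot : Int × Int) (m_knot : Int × Int) : Nat → Int → Int → Bool
  | 0, _, _ => false
  | n + 1, x, y =>
    if knot.1 + x = m_knot.1 ∧ knot.2 + y = m_knot.2 then
      true
    else
      let x' := x + 1
      if x' = 2 then touchesKnotLoop knot m_knot n (-1) (y + 1)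
      else touchesKnotLoop knot m_knot n x' y

def touches_knot (knot : Int × Int) (m_knot : Int × Int) : Bool :=
  touchesKnotLoop knot m_knot 9 (-1) (-1)

-- ===== PORT B =====
def touches_knot_alt (knot : Int × Int) (m_knot : Int × Int) : Bool :=
  (knot.1 - m_knot.1).natAbs ≤ 1 && (knot.2 - m_knot.2).natAbs ≤ 1

-- ===== PRECONDITION & SPEC =====
def Spec_touches_knot (knot : Int × Int) (m_knot : Int × Int) (out : Bool) : Prop := out = touches_knot_alt knot m_knot
instance (knot : Int × Int) (m_knot : Int × Int) (out : Bool) : Decidable (Spec_touches_knot knot m_knot out) := by unfold Spec_touches_knot; infer_instance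

-- ===== CLAIM (what is proved, stated in full; the proofs are below) =====
def Claim_equal_touches_knot : Prop := ∀ (knot : Int × Int) (m_knot : Int × Int), Dom_touches_knot knot m_knot → Spec_touches_knot knot m_knot (touches_knot knot m_knot)

-- ===== LEMMAS AND PROOFS =====

-- ===== VERDICT (by name: the statement is the Claim_ definition above) =====
theorem touches_knot_spec : Claim_equal_touches_knot := by
  intro ⟨a, b⟩ ⟨c, d⟩ _
  unfold Spec_touches_knot touches_knot touches_knot_alt
  simp only [touchesKnotLoop]
  norm_num
  rw [Bool.eq_iff_iff]
  simp only [Bool.or_eq_true, Bool.and_eq_true, decide_eq_true_eq]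
  omega
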